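-- pv_equiv track=rewrite | github.com/miseop25/Back_Jun_Code_Study | Programmers/기타문제/영어끝말잇기/engWordGame_ver1.py | solution
-- ===== SOURCE A (Python) =====
-- def solution(n, words):
--     answer = []
--     person = dict()
--     di = dict()
--     for i in range(1, n+1) :
--         person[i] = 1
--     endWord = words[0][-1]
--     person[1] += 1
--     di[words[0]] = True
--     i = 2
--     for w in words[1:] :
--         if w in di or w[0] != endWord :
--             answer.append(i)
--             answer.append(person[i])
--             return answer
--         di[w] = True
--         endWord = w[-1]
--         person[i] += 1
--         if i == n :
--             i = 1
--         else :
--             i += 1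
--
--     return [0,0]
-- ===== SOURCE B (Python) =====
-- def solution(n, words):
--     m = len(words)
--     starts = [w[0] for w in words]
--     ends = [w[-1] for w in words]
--     breaks = [j for j in range(1, m) if starts[j] != ends[j - 1]]
--     first = {words[0]: 0}
--     for j, w in enumerate(words[1:], 1):
--         first.setdefault(w, j)
--     dups = [j for j in range(1, m) if first[words[j]] < j]
--     fails = breaks + dups
--     if not fails:
--         return [0, 0]
--     j = min(fails)
--     return [j % n + 1, j // n + 1]
-- ===== Notes on version B (the rewrite author's own statement) =====
-- stated objective: alternative
-- what changed: B replaces A's single stateful scan (seen-words dict, per-player counter dict built for all n players, cycling player cursor) with staged passes: first/last-letter lists give the chain-break indices, a first-occurrence index gives the duplicate indices, and the minimum failing index yields player and turn by arithmetic.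
-- outside the precondition, e.g. on solution(2, ['ab', 'xy', '']): A returns [2, 1], B raises IndexError
import Mathlib
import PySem

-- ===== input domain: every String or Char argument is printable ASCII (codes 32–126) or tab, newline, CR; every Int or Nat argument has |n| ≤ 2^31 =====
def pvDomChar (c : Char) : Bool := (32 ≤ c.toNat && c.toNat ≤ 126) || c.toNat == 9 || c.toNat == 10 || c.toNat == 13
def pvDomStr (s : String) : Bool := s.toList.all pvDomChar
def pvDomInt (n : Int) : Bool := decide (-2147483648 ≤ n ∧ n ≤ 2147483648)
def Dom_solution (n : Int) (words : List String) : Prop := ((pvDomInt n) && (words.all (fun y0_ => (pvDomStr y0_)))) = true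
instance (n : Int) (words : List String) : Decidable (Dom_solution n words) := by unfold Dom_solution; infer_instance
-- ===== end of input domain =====

-- B replaces A's single stateful scan (seen dict, per-player counter dict, cycling cursor) with
-- three staged passes — chain-break indices, a first-occurrence index for duplicates, then the
-- minimum failing index — and derives player/turn by arithmetic on it (objective: alternative).

-- ===== PORT A =====
-- 'for i in range(1, n+1): person[i] = 1' — every key is fresh and distinct, so each
-- Dict.insert appends one item; ported as that one-pass append
def solutionInitPerson (n : Int) : PySem.Dict Int Int :=
  PySem.Dict.mk ((PySem.List.pyRange 1 (n + 1)).map (fun i => (i, 1)))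

-- 'for w in words[1:]: …' with state (di, endWord, person, i)
def solutionLoopA (n : Int) (di : PySem.Dict String Bool) (endWord : Char)
    (person : PySem.Dict Int Int) (i : Int) : List String → List Int
  | [] => [0, 0]
  | w :: rest =>
    if di.contains w || !(PySem.Str.pyGet? w 0 == some endWord) then
      [i, person.getD i 0]
    else
      match PySem.Str.pyGet? w (-1) with
      | none => []  -- unreachable: the taken branch needs w[0] to exist, so w is nonempty
      | some e =>
        solutionLoopA n (di.insert w true) e
          (person.insert i (person.getD i 0 + 1))
          (if i == n then 1 else i + 1) rest

def solution (n : Int) (words : List String) : List Int :=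
  let person := solutionInitPerson n
  match PySem.List.pyGet? words 0 with
  | none => []  -- IndexError on words[0] (excluded by Pre_)
  | some w0 =>
    match PySem.Str.pyGet? w0 (-1) with
    | none => []  -- IndexError on words[0][-1] (excluded by Pre_)
    | some endWord =>
      solutionLoopA n (PySem.Dict.empty.insert w0 true) endWord
        (person.insert 1 (person.getD 1 0 + 1)) 2
        (PySem.List.slice words (some 1) none)

-- ===== PORT B =====
-- staged passes: first/last-letter lists give chain-break indices, a first-occurrence dict
-- (seeded with words[0]) gives duplicate indices, then min of the failing indices and
-- index arithmetic
def solution_alt (n : Int) (words : List String) : List Int :=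
  let m : Int := (words.length : Int)
  let starts := words.map (fun w => PySem.Str.pyGet? w 0)    -- w[0]; none = IndexError (excluded by Pre_)
  let ends := words.map (fun w => PySem.Str.pyGet? w (-1))   -- w[-1]; none = IndexError (excluded by Pre_)
  let breaks := (PySem.List.pyRange 1 m).filter
    (fun j => !(PySem.List.pyGetD starts j none == PySem.List.pyGetD ends (j - 1) none))
  match PySem.List.pyGet? words 0 with
  | none => []  -- IndexError on words[0] (excluded by Pre_)
  | some w0 =>
    let first := (PySem.List.enumerate (PySem.List.slice words (some 1) none) 1).foldl
      (fun d p => d.setdefault p.2 p.1)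
      ((PySem.Dict.empty : PySem.Dict String Int).insert w0 0)
    let dups := (PySem.List.pyRange 1 m).filter
      (fun j => decide (first.getD (PySem.List.pyGetD words j "") 0 < j))
    let fails := breaks ++ dups
    if fails.isEmpty then [0, 0]
    else
      match PySem.List.min? fails (fun x => x) with
      | some j => [PySem.Int.mod j n + 1, PySem.Int.floordiv j n + 1]
      | none => []  -- unreachable: fails is nonempty

-- ===== PRECONDITION & SPEC =====
-- Pre_ excludes the inputs on which A raises (the empty word list; n <= 0, and n = 1 whenever a
-- second word is processed, KeyError on the per-player counter; an empty word reached by A's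
-- scan, IndexError on w[0]) and also lists containing an empty word after an earlier failing
-- position: there A returns but B's staged first/last-letter passes raise IndexError (see cite).
def Pre_solution (n : Int) (words : List String) : Prop :=
  (2 ≤ n ∨ (1 ≤ n ∧ words.length = 1)) ∧ words ≠ [] ∧ ¬ ("" ∈ words)
instance (n : Int) (words : List String) : Decidable (Pre_solution n words) := by
  unfold Pre_solution; infer_instance

def pvWitness_solution : Int × List String := (2, ["ab", "ba", "ab"])

def Spec_solution (n : Int) (words : List String) (out : List Int) : Prop := out = solution_alt n words
instance (n : Int) (words : List String) (out : List Int) : Decidable (Spec_solution n words out) := by unfold Spec_solution; infer_instance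

-- ===== CLAIM (what is proved, stated in full; the proofs are below) =====
def Claim_equal_solution : Prop := ∀ (n : Int) (words : List String), Dom_solution n words → Pre_solution n words → Spec_solution n words (solution n words)

-- ===== LEMMAS AND PROOFS =====

-- proof-side reference scan: B's old-fashioned single pass expressed with an index counter;
-- A's loop is reduced to it (loop_eq), and it in turn to B's staged passes (scan_eq_find)
def scanLoop (n : Int) (j : Int) (seen : PySem.Set String)
    (prevEnd : Char) : List String → List Int
  | [] => [0, 0]
  | w :: rest =>
    if PySem.Set.contains seen w || !(PySem.Str.pyGet? w 0 == some prevEnd) then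
      [PySem.Int.mod j n + 1, PySem.Int.floordiv j n + 1]
    else
      match PySem.Str.pyGet? w (-1) with
      | none => []
      | some e => scanLoop n (j + 1) (PySem.Set.add seen w) e rest

-- successor step of Python divmod by a positive modulus (variable modulus, so omega needs it supplied)
theorem step_divmod (n j : Int) (hn : 0 < n) :
    (j % n ≠ n - 1 ∧ (j + 1) % n = j % n + 1 ∧ (j + 1) / n = j / n) ∨
    (j % n = n - 1 ∧ (j + 1) % n = 0 ∧ (j + 1) / n = j / n + 1) := by
  have hlt := Int.emod_lt_of_pos j hn
  have hnn := Int.emod_nonneg j (ne_of_gt hn)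
  by_cases h : j % n = n - 1
  · right
    have e1 : j + 1 = n * (j / n + 1) := by
      rw [mul_add, mul_one]; linarith [Int.mul_ediv_add_emod j n]
    refine ⟨h, ?_, ?_⟩
    · rw [e1, Int.mul_emod_right]
    · rw [e1, Int.mul_ediv_cancel_left _ (ne_of_gt hn)]
  · left
    have e1 : j + 1 = j % n + 1 + n * (j / n) := by
      linarith [Int.mul_ediv_add_emod j n]
    refine ⟨h, ?_, ?_⟩
    · rw [e1, Int.add_mul_emod_self_left, Int.emod_eq_of_lt (by omega) (by omega)]
    · rw [e1, Int.add_mul_ediv_left _ _ (ne_of_gt hn),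
        Int.ediv_eq_zero_of_lt (by omega) (by omega)]
      omega

-- membership in a PySem.Set after add, as a Bool equation
theorem set_contains_add (s : PySem.Set String) (x y : String) :
    PySem.Set.contains (PySem.Set.add s x) y
      = (y == x || PySem.Set.contains s y) := by
  by_cases h : y = x
  · subst h
    simp [PySem.Set.add]
    split <;> simp_all
  · simp [PySem.Set.add, PySem.Set.contains]
    split <;> simp [h]

-- loop invariant: A's (person, i) state is a function of the reference scan's running index j
theorem loop_eq (n : Int) (hn : 2 ≤ n) :
    ∀ (rest : List String) (j : Int) (di : PySem.Dict String Bool)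
      (seen : PySem.Set String) (endWord : Char) (person : PySem.Dict Int Int),
      1 ≤ j →
      (∀ w, di.contains w = PySem.Set.contains seen w) →
      (∀ k : Int, 1 ≤ k → k ≤ n →
        person.get? k = some (1 + PySem.Int.floordiv j n +
          (if k - 1 < PySem.Int.mod j n then 1 else 0))) →
      solutionLoopA n di endWord person (PySem.Int.mod j n + 1) rest
        = scanLoop n j seen endWord rest := by
  intro rest
  induction rest with
  | nil => intro j di seen endWord person hj hdi hp; rfl
  | cons w rs ih =>
    intro j di seen endWord person hj hdi hp
    have hn0 : (0:Int) < n := by omega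
    have hmod := PySem.Int.mod_eq_emod_of_pos (a := j) hn0
    have hfd := PySem.Int.floordiv_eq_ediv_of_pos (a := j) hn0
    have hmodlt := PySem.Int.mod_lt (a := j) hn0
    have hmodnn := PySem.Int.mod_nonneg (a := j) hn0
    simp only [solutionLoopA, scanLoop, hdi]
    by_cases hc : (PySem.Set.contains seen w || !(PySem.Str.pyGet? w 0 == some endWord)) = true
    · rw [if_pos hc, if_pos hc]
      have hpk := hp (PySem.Int.mod j n + 1) (by omega) (by omega)
      rw [PySem.Dict.getD_eq_get?_getD, hpk]
      simp only [if_neg (by omega : ¬ (PySem.Int.mod j n + 1 - 1 < PySem.Int.mod j n))]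
      norm_num
      omega
    · rw [if_neg hc, if_neg hc]
      cases he : PySem.Str.pyGet? w (-1) with
      | none => rfl
      | some e =>
        have hi : (if (PySem.Int.mod j n + 1) == n then 1 else PySem.Int.mod j n + 1 + 1)
            = PySem.Int.mod (j + 1) n + 1 := by
          have hmod1 := PySem.Int.mod_eq_emod_of_pos (a := j + 1) hn0
          rcases step_divmod n j hn0 with ⟨hne, h1, h2⟩ | ⟨heq, h1, h2⟩ <;>
            by_cases h : PySem.Int.mod j n + 1 = n <;> simp [h] <;> omega
        rw [hi]
        apply ih (j + 1) _ _ e _ (by omega)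
        · intro w'
          rw [PySem.Dict.contains_insert, set_contains_add, hdi]
        · intro k hk1 hk2
          have hmod1 := PySem.Int.mod_eq_emod_of_pos (a := j + 1) hn0
          have hfd1 := PySem.Int.floordiv_eq_ediv_of_pos (a := j + 1) hn0
          rw [PySem.Dict.get?_insert]
          by_cases hk : k = PySem.Int.mod j n + 1
          · rw [if_pos hk]
            have hpk := hp (PySem.Int.mod j n + 1) (by omega) (by omega)
            rw [PySem.Dict.getD_eq_get?_getD, hpk]
            simp only [if_neg (by omega : ¬ (PySem.Int.mod j n + 1 - 1 < PySem.Int.mod j n))]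
            norm_num
            rcases step_divmod n j hn0 with ⟨hne, h1, h2⟩ | ⟨heq, h1, h2⟩ <;>
              split_ifs <;> omega
          · rw [if_neg hk, hp k hk1 hk2]
            congr 1
            rcases step_divmod n j hn0 with ⟨hne, h1, h2⟩ | ⟨heq, h1, h2⟩ <;>
              split_ifs <;> omega

-- the init dict gives every key in 1..n the value 1
theorem get?_mk_map_one (l : List Int) (k : Int) :
    (PySem.Dict.mk (l.map (fun i => (i, (1 : Int))))).get? k
      = if k ∈ l then some 1 else none := by
  induction l with
  | nil => simp [PySem.Dict.get?]
  | cons x xs ih =>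
    simp only [List.map_cons, PySem.Dict.get?_mk_cons, ih, List.mem_cons]
    by_cases hx : k = x <;> simp [hx, beq_eq_decide, eq_comm]

theorem initPerson_get? (n k : Int) (h1 : 1 ≤ k) (h2 : k ≤ n) :
    (solutionInitPerson n).get? k = some 1 := by
  unfold solutionInitPerson
  rw [get?_mk_map_one]
  simp [PySem.List.mem_pyRange_one]
  omega

-- A's program after its prologue is the reference scan (loop lemma at the initial states)
theorem top_eq (n : Int) (w0 : String) (rest : List String) (hn : 2 ≤ n) :
    solutionLoopA n (PySem.Dict.empty.insert w0 true) e
      ((solutionInitPerson n).insert 1 ((solutionInitPerson n).getD 1 0 + 1)) 2 rest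
    = scanLoop n 1 (PySem.Set.ofList [w0]) e rest := by
  have hn0 : (0:Int) < n := by omega
  have hm1 : (1:Int) % n = 1 := Int.emod_eq_of_lt (by omega) (by omega)
  have hd1 : (1:Int) / n = 0 := Int.ediv_eq_zero_of_lt (by omega) (by omega)
  have h2 : (2:Int) = PySem.Int.mod 1 n + 1 := by
    rw [PySem.Int.mod_eq_emod_of_pos hn0, hm1]; norm_num
  rw [h2]
  apply loop_eq n hn rest 1 _ _ e _ (by omega)
  · intro w'
    rw [PySem.Dict.contains_insert]
    simp [PySem.Set.ofList, PySem.Set.contains, PySem.Set.add, PySem.Set.empty,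
      beq_eq_decide]
  · intro k hk1 hk2
    rw [PySem.Dict.get?_insert, PySem.Int.mod_eq_emod_of_pos hn0,
      PySem.Int.floordiv_eq_ediv_of_pos hn0, hm1, hd1,
      PySem.Dict.getD_eq_get?_getD, initPerson_get? n 1 (by omega) (by omega)]
    by_cases hk : k = 1
    · subst hk; norm_num
    · rw [if_neg hk, initPerson_get? n k hk1 hk2]
      simp only [if_neg (by omega : ¬ (k - 1 < 1))]; norm_num

theorem last_exists (w : String) (h : w ≠ "") :
    ∃ e, PySem.Str.pyGet? w (-1) = some e := by
  have hl : w.toList ≠ [] := by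
    intro hc; apply h; cases w; simp_all
  rw [show PySem.Str.pyGet? w (-1) = PySem.List.pyGet? w.toList (-1) from rfl]
  rw [PySem.List.pyGet?_neg_one]
  cases hg : w.toList.getLast? with
  | none => simp_all
  | some c => exact ⟨c, rfl⟩

-- the game-failure test at index j of the word list, over Nat indices
def failB (ws : List String) (j : Nat) : Bool :=
  decide (ws.getD j "" ∈ ws.take j) ||
  !((ws.getD j "").toList.head? == (ws.getD (j - 1) "").toList.getLast?)

-- turn the first failing index (or none) into the answer pair
def renderFail (n : Int) : Option Nat → List Int
  | none => [0, 0]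
  | some j => [PySem.Int.mod (j : Int) n + 1, PySem.Int.floordiv (j : Int) n + 1]

theorem str_pyGet0 (w : String) : PySem.Str.pyGet? w 0 = w.toList.head? := by
  simp [pysem, PySem.List.pyGet?, PySem.List.pyIdx?]
  split <;> rename_i hh
  · simp [← List.head?_eq_getElem?]
  · have h0 : w.toList.length = 0 := by
      have : w.length = w.toList.length := rfl
      omega
    simp [List.eq_nil_of_length_eq_zero h0]

-- the reference scan computes the first failing index, rendered
theorem scan_eq_find (n : Int) : ∀ (remaining pre : List String)
    (seen : PySem.Set String) (prevEnd : Char) (h : pre ≠ []),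
    (∀ w, PySem.Set.contains seen w = decide (w ∈ pre)) →
    (pre.getLast h).toList.getLast? = some prevEnd →
    scanLoop n (pre.length : Int) seen prevEnd remaining
      = renderFail n ((List.range' pre.length remaining.length).find? (failB (pre ++ remaining))) := by
  intro remaining
  induction remaining with
  | nil => intro pre seen prevEnd h hseen hlast; rfl
  | cons w rs ih =>
    intro pre seen prevEnd h hseen hlast
    have hget : (pre ++ w :: rs).getD pre.length "" = w := by
      simp [List.getD]
    have htake : (pre ++ w :: rs).take pre.length = pre := List.take_left
    have hprev : (pre ++ w :: rs).getD (pre.length - 1) "" = pre.getLast h := by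
      have hp : 0 < pre.length := List.length_pos_iff.mpr h
      rw [List.getD, List.getElem?_append_left (by omega : pre.length - 1 < pre.length),
        ← List.getLast?_eq_getElem?, List.getLast?_eq_getLast_of_ne_nil h]
      rfl
    have hcond : (PySem.Set.contains seen w || !(PySem.Str.pyGet? w 0 == some prevEnd))
        = failB (pre ++ w :: rs) pre.length := by
      unfold failB
      rw [hget, htake, hprev, hseen, str_pyGet0, hlast]
    simp only [List.length_cons]
    rw [List.range'_succ]
    simp only [scanLoop, hcond]
    by_cases hb : failB (pre ++ w :: rs) pre.length = true
    · rw [if_pos hb, List.find?_cons_of_pos hb]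
      rfl
    · rw [if_neg hb, List.find?_cons_of_neg (by simp [hb])]
      have hb' := hb
      rw [Bool.not_eq_true] at hb'
      unfold failB at hb'
      rw [hget, htake, hprev, hlast] at hb'
      have hmem : decide (w ∈ pre) = false := by
        cases hd : decide (w ∈ pre) <;> simp [hd] at hb' ⊢
      have hhd : w.toList.head? = some prevEnd := by
        rw [hmem] at hb'
        simpa using hb'
      have hwne : w ≠ "" := by
        intro hc; subst hc; simp at hhd
      obtain ⟨e, he⟩ := last_exists w hwne
      rw [he]
      have hlen : (pre.length : Int) + 1 = (((pre ++ [w]).length : Nat) : Int) := by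
        simp
      rw [hlen]
      show scanLoop n (((pre ++ [w]).length : Nat) : Int) (PySem.Set.add seen w) e rs = _
      rw [ih (pre ++ [w]) (PySem.Set.add seen w) e (by simp) ?_ ?_]
      · have hws : (pre ++ [w]) ++ rs = pre ++ w :: rs := by simp
        rw [hws]
        have hl2 : (pre ++ [w]).length = pre.length + 1 := by simp
        rw [hl2]
      · intro w'
        rw [set_contains_add, hseen]
        simp [List.mem_append, Bool.or_comm, beq_eq_decide, eq_comm]
      · rw [List.getLast_concat]
        have := he
        rw [show PySem.Str.pyGet? w (-1) = PySem.List.pyGet? w.toList (-1) from rfl,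
          PySem.List.pyGet?_neg_one] at this
        exact this

theorem str_pyGetNeg1 (w : String) : PySem.Str.pyGet? w (-1) = w.toList.getLast? := by
  rw [show PySem.Str.pyGet? w (-1) = PySem.List.pyGet? w.toList (-1) from rfl,
    PySem.List.pyGet?_neg_one]

theorem idxOf?_cons (x w : String) (l : List String) :
    List.idxOf? w (x :: l) = if x == w then some 0 else (List.idxOf? w l).map (· + 1) := by
  simp [List.idxOf?, List.findIdx?_cons]

-- the setdefault fold builds the first-occurrence index
theorem first_fold_get? (xs : List String) : ∀ (s : Int) (d : PySem.Dict String Int) (w : String),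
    ((PySem.List.enumerate xs s).foldl (fun d p => d.setdefault p.2 p.1) d).get? w
      = (d.get? w).or ((List.idxOf? w xs).map (fun i => s + (i : Int))) := by
  induction xs with
  | nil => intro s d w; simp [pysem, List.idxOf?]
  | cons x xs ih =>
    intro s d w
    rw [PySem.List.enumerate_cons, List.foldl_cons, ih, idxOf?_cons]
    by_cases hw : w = x
    · subst hw
      rw [if_pos (by simp), PySem.Dict.get?_setdefault_self]
      cases d.get? w <;> simp [Option.or]
    · rw [if_neg (by simp [Ne.symm hw]), PySem.Dict.get?_setdefault_of_ne d s hw]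
      congr 1
      cases List.idxOf? w xs <;> simp
      ring

-- B's duplicate test via the first-occurrence dict is membership in the preceding prefix
theorem dup_pred_eq (ws : List String) (w0 : String) (rest : List String)
    (hsplit : ws = w0 :: rest) (x : Int) (h1 : 1 ≤ x)
    (h2 : x < (ws.length : Int)) :
    decide ((((PySem.List.enumerate rest 1).foldl (fun d p => d.setdefault p.2 p.1)
        ((PySem.Dict.empty : PySem.Dict String Int).insert w0 0)).getD
          (PySem.List.pyGetD ws x "") 0) < x)
      = decide ((w0 :: rest).getD x.toNat "" ∈ (w0 :: rest).take x.toNat) := by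
  subst hsplit
  rw [PySem.List.pyGetD_of_nonneg (w0 :: rest) "" (by omega)]
  have hxl : x.toNat < (w0 :: rest).length := by omega
  
  set w := (w0 :: rest).getD x.toNat "" with hw
  have hmem : w ∈ (w0 :: rest) := by
    rw [hw, List.getD, List.getElem?_eq_getElem hxl]
    exact List.getElem_mem hxl
  obtain ⟨i, hi⟩ := Option.isSome_iff_exists.mp (List.isSome_idxOf?.mpr hmem)
  have hfold : ((PySem.List.enumerate rest 1).foldl (fun d p => d.setdefault p.2 p.1)
      ((PySem.Dict.empty : PySem.Dict String Int).insert w0 0)).get? w = some (i : Int) := by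
    rw [first_fold_get?]
    by_cases hww : w = w0
    · have h0 : List.idxOf? w (w0 :: rest) = some 0 := by
        rw [idxOf?_cons, if_pos (by simp [hww])]
      rw [h0] at hi
      injection hi with hi
      rw [PySem.Dict.get?_insert, if_pos hww, ← hi]
      rfl
    · have hcons : List.idxOf? w (w0 :: rest) = (List.idxOf? w rest).map (· + 1) := by
        rw [idxOf?_cons, if_neg (by simp [Ne.symm hww])]
      have hget0 : ((PySem.Dict.empty : PySem.Dict String Int).insert w0 0).get? w = none := by
        rw [PySem.Dict.get?_insert, if_neg hww]
        simp [pysem]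
      rw [hget0, Option.none_or]
      rw [hcons] at hi
      cases hrest : List.idxOf? w rest with
      | none => rw [hrest] at hi; simp at hi
      | some k =>
        rw [hrest] at hi
        simp at hi
        simp [← hi]
        omega
  rw [PySem.Dict.getD_eq_get?_getD, hfold]
  simp only [Option.getD_some]
  obtain ⟨hilen, hieq, himin⟩ := List.idxOf?_eq_some_iff.mp hi
  rw [decide_eq_decide]
  constructor
  · intro hlt
    exact List.mem_take_iff_getElem.mpr ⟨i, by omega, hieq⟩
  · intro hm
    obtain ⟨k, hk, hkeq⟩ := List.mem_take_iff_getElem.mp hm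
    have : i ≤ k := by
      by_contra hc
      exact himin k (by omega) hkeq
    omega

-- B's chain-break test equals the head?/getLast? test of failB
theorem brk_pred_eq (ws : List String) (x : Int) (h1 : 1 ≤ x) (h2 : x < (ws.length : Int)) :
    (!(PySem.List.pyGetD (ws.map (fun w => PySem.Str.pyGet? w 0)) x none
        == PySem.List.pyGetD (ws.map (fun w => PySem.Str.pyGet? w (-1))) (x - 1) none))
      = !((ws.getD x.toNat "").toList.head? == (ws.getD (x.toNat - 1) "").toList.getLast?) := by
  rw [PySem.List.pyGetD_of_nonneg _ none (by omega : (0:Int) ≤ x),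
    PySem.List.pyGetD_of_nonneg _ none (by omega : (0:Int) ≤ x - 1)]
  have hx : x.toNat < ws.length := by omega
  have hx1 : x.toNat - 1 < ws.length := by omega
  have hxx : (x - 1).toNat = x.toNat - 1 := by omega
  rw [hxx]
  simp only [List.getD, List.getElem?_map, List.getElem?_eq_getElem hx,
    List.getElem?_eq_getElem hx1, Option.map_some, Option.getD_some,
    str_pyGet0, str_pyGetNeg1]

-- find? on a range' finds the FIRST index satisfying the predicate
theorem find?_range'_min {p : Nat → Bool} : ∀ (len s jf : Nat),
    (List.range' s len).find? p = some jf → ∀ i, s ≤ i → i < jf → p i = false := by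
  intro len
  induction len with
  | zero => intro s jf hf; simp at hf
  | succ l ih =>
    intro s jf hf i hsi hij
    rw [List.range'_succ] at hf
    by_cases hp : p s = true
    · rw [List.find?_cons_of_pos hp] at hf
      injection hf with hf
      omega
    · rw [List.find?_cons_of_neg (by simp [hp])] at hf
      rcases Nat.eq_or_lt_of_le hsi with he | hl
      · subst he
        exact Bool.eq_false_iff.mpr hp
      · exact ih (s + 1) jf hf i hl hij

-- B's staged passes compute the first failing index, rendered
theorem alt_eq_find (n : Int) (w0 : String) (rest : List String) :
    solution_alt n (w0 :: rest)
      = renderFail n ((List.range' 1 rest.length).find? (failB (w0 :: rest))) := by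
  unfold solution_alt
  simp only [PySem.List.pyGet?_zero_cons, PySem.List.slice_from_one, List.tail_cons]
  set ws := w0 :: rest with hws
  have hm : (ws.length : Int) = (rest.length : Int) + 1 := by simp [hws]
  cases hf : (List.range' 1 rest.length).find? (failB ws) with
  | none =>
    have hall := List.find?_eq_none.mp hf
    have hbe : (PySem.List.pyRange 1 (ws.length : Int)).filter
        (fun j => !(PySem.List.pyGetD (ws.map (fun w => PySem.Str.pyGet? w 0)) j none
          == PySem.List.pyGetD (ws.map (fun w => PySem.Str.pyGet? w (-1))) (j - 1) none)) = [] := by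
      rw [List.filter_eq_nil_iff]
      intro x hx
      rw [PySem.List.mem_pyRange_one] at hx
      have hfx := hall x.toNat (List.mem_range'_1.mpr (by omega))
      unfold failB at hfx
      rw [brk_pred_eq ws x hx.1 hx.2]
      simp only [Bool.or_eq_true, not_or] at hfx
      simpa using hfx.2
    have hde : (PySem.List.pyRange 1 (ws.length : Int)).filter
        (fun j => decide ((((PySem.List.enumerate rest 1).foldl (fun d p => d.setdefault p.2 p.1)
          ((PySem.Dict.empty : PySem.Dict String Int).insert w0 0)).getD (PySem.List.pyGetD ws j "") 0) < j)) = [] := by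
      rw [List.filter_eq_nil_iff]
      intro x hx
      rw [PySem.List.mem_pyRange_one] at hx
      have hfx := hall x.toNat (List.mem_range'_1.mpr (by omega))
      unfold failB at hfx
      rw [dup_pred_eq ws w0 rest hws x hx.1 hx.2]
      simp only [Bool.or_eq_true, not_or] at hfx
      simpa using hfx.1
    rw [hbe, hde]
    rfl
  | some jf =>
    have hpjf : failB ws jf = true := List.find?_some hf
    have hjfmem := List.mem_range'_1.mp (List.mem_of_find?_eq_some hf)
    have hmin := find?_range'_min rest.length 1 jf hf
    have hjf1 : 1 ≤ jf := hjfmem.1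
    have hjfm : jf < ws.length := by simp [hws]; omega
    have hjtn : ((jf : Int)).toNat = jf := by omega
    -- ↑jf is in breaks or in dups
    have hjin : (jf : Int) ∈ (PySem.List.pyRange 1 (ws.length : Int)) := by
      rw [PySem.List.mem_pyRange_one]
      omega
    unfold failB at hpjf
    rw [Bool.or_eq_true] at hpjf
    have hjfails : (jf : Int) ∈ (PySem.List.pyRange 1 (ws.length : Int)).filter
          (fun j => !(PySem.List.pyGetD (ws.map (fun w => PySem.Str.pyGet? w 0)) j none
            == PySem.List.pyGetD (ws.map (fun w => PySem.Str.pyGet? w (-1))) (j - 1) none))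
        ++ (PySem.List.pyRange 1 (ws.length : Int)).filter
          (fun j => decide ((((PySem.List.enumerate rest 1).foldl (fun d p => d.setdefault p.2 p.1)
            ((PySem.Dict.empty : PySem.Dict String Int).insert w0 0)).getD (PySem.List.pyGetD ws j "") 0) < j)) := by
      rw [List.mem_append]
      cases hpjf with
      | inl hdup =>
        right
        rw [List.mem_filter]
        refine ⟨hjin, ?_⟩
        rw [dup_pred_eq ws w0 rest hws (jf : Int) (by omega) (by omega), hjtn]
        exact hdup
      | inr hbrk =>
        left
        rw [List.mem_filter]
        refine ⟨hjin, ?_⟩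
        rw [brk_pred_eq ws (jf : Int) (by omega) (by omega), hjtn]
        exact hbrk
    set fails := (PySem.List.pyRange 1 (ws.length : Int)).filter
          (fun j => !(PySem.List.pyGetD (ws.map (fun w => PySem.Str.pyGet? w 0)) j none
            == PySem.List.pyGetD (ws.map (fun w => PySem.Str.pyGet? w (-1))) (j - 1) none))
        ++ (PySem.List.pyRange 1 (ws.length : Int)).filter
          (fun j => decide ((((PySem.List.enumerate rest 1).foldl (fun d p => d.setdefault p.2 p.1)
            ((PySem.Dict.empty : PySem.Dict String Int).insert w0 0)).getD (PySem.List.pyGetD ws j "") 0) < j)) with hfails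
    have hne : fails ≠ [] := List.ne_nil_of_mem hjfails
    rw [if_neg (by simpa [List.isEmpty_iff] using hne)]
    cases hmn : PySem.List.min? fails (fun x => x) with
    | none => exact absurd ((PySem.List.min?_eq_none_iff fails _).mp hmn) hne
    | some v =>
      -- every element of fails is a failing index ≥ jf
      have hvmem := PySem.List.min?_mem hmn
      have hvge : (jf : Int) ≤ v := by
        rw [hfails, List.mem_append] at hvmem
        have hv : 1 ≤ v ∧ v < (ws.length : Int) ∧ failB ws v.toNat = true := by
          cases hvmem with
          | inl hb =>
            rw [List.mem_filter, PySem.List.mem_pyRange_one] at hb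
            refine ⟨hb.1.1, hb.1.2, ?_⟩
            unfold failB
            rw [Bool.or_eq_true]
            right
            have := hb.2
            rw [brk_pred_eq ws v hb.1.1 hb.1.2] at this
            exact this
          | inr hd =>
            rw [List.mem_filter, PySem.List.mem_pyRange_one] at hd
            refine ⟨hd.1.1, hd.1.2, ?_⟩
            unfold failB
            rw [Bool.or_eq_true]
            left
            have := hd.2
            rw [dup_pred_eq ws w0 rest hws v hd.1.1 hd.1.2] at this
            exact this
        obtain ⟨hv1, hvm, hvfail⟩ := hv
        by_contra hc
        have hvn : v.toNat < jf := by omega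
        have := hmin v.toNat (by omega) hvn
        rw [this] at hvfail
        exact Bool.false_ne_true hvfail
      have hvle : v ≤ (jf : Int) := PySem.List.min?_isMin hmn (jf : Int) hjfails
      have hv : v = (jf : Int) := le_antisymm hvle hvge
      rw [hv]
      rfl

-- ===== VERDICT (by name: the statement is the Claim_ definition above) =====
theorem solution_spec : Claim_equal_solution := by
  intro n words _hdom hpre
  obtain ⟨hn, hne, hnem⟩ := hpre
  cases words with
  | nil => exact absurd rfl hne
  | cons w0 rest =>
    have hw0 : w0 ≠ "" := by
      intro hc
      exact hnem (by rw [← hc]; exact List.mem_cons_self)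
    obtain ⟨e, he⟩ := last_exists w0 hw0
    unfold Spec_solution solution
    simp only [PySem.List.pyGet?_zero_cons, he, PySem.List.slice_from_one, List.tail_cons]
    cases rest with
    | nil =>
      show solutionLoopA n (PySem.Dict.empty.insert w0 true) e _ 2 [] = _
      unfold solution_alt solutionLoopA
      simp
    | cons w1 rs =>
      have hn2 : 2 ≤ n := by
        rcases hn with h | ⟨_, hl⟩
        · exact h
        · simp at hl
      rw [top_eq n w0 (w1 :: rs) hn2, alt_eq_find n w0 (w1 :: rs)]
      have h1 : (1 : Int) = (([w0] : List String).length : Int) := by simp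
      rw [h1, scan_eq_find n (w1 :: rs) [w0] _ e (by simp)]
      · simp
      · intro w
        simp [PySem.Set.ofList, PySem.Set.contains, PySem.Set.add, PySem.Set.empty, eq_comm]
      · have hg : ([w0].getLast (by simp)) = w0 := by simp
        rw [hg]
        have := he
        rw [str_pyGetNeg1] at this
        exact this
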